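-- pv_equiv track=rewrite | github.com/miliar/Code_Jam_Webscraper | Solutions_python/Problem_178/3892.py | CountFlip
-- ===== SOURCE A (Python) =====
-- def CountFlip(inputText):
-- 	currentStatus = 0
-- 	flipCount = 0
-- 	for i in range(len(inputText)):
-- 		if currentStatus == 0 and inputText[len(inputText)-1-i] == "-" :
-- 			flipCount = flipCount + 1
-- 			currentStatus = 1
-- 		elif currentStatus == 1 and inputText[len(inputText)-1-i] == "+" :
-- 			flipCount = flipCount + 1
-- 			currentStatus = 0
-- 	return flipCount
-- ===== SOURCE B (Python) =====
-- def CountFlip(inputText):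
--     seq = [c for c in inputText if c in "+-"]
--     if not seq:
--         return 0
--     return sum(1 for a, b in zip(seq, seq[1:]) if a != b) + (1 if seq[-1] == "-" else 0)
-- ===== Notes on version B (the rewrite author's own statement) =====
-- stated objective: alternative
-- what changed: Replaces the right-to-left stateful flip-toggle simulation (indexing with len-1-i each step) by a stateless formula: filter to the '+'/'-' subsequence and count adjacent sign transitions plus one if the last sign is '-'.
import Mathlib
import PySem

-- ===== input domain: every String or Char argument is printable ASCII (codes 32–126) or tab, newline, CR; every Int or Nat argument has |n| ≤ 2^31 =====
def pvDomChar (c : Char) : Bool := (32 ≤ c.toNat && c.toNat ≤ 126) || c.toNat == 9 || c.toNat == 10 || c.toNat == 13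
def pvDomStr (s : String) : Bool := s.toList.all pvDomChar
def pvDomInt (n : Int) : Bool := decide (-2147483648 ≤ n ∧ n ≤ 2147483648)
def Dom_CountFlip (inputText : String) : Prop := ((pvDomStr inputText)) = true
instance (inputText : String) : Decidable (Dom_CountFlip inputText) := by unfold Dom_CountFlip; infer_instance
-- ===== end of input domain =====

-- B replaces A's right-to-left stateful flip-toggle simulation by a stateless formula on the
-- '+'/'-' subsequence (adjacent sign transitions, plus one if the last sign is '-'); objective: alternative.

-- ===== PORT A =====
def CountFlip (inputText : String) : Int :=
  ((PySem.List.pyRange 0 (inputText.toList.length : Int) 1).foldl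
    (fun (st : Int × Int) i =>
      -- st = (flipCount, currentStatus); inputText[len-1-i] always in range, pyGetD is exact here
      if st.2 = 0 ∧ PySem.List.pyGetD inputText.toList ((inputText.toList.length : Int) - 1 - i) ' ' = '-'
        then (st.1 + 1, (1 : Int))
      else if st.2 = 1 ∧ PySem.List.pyGetD inputText.toList ((inputText.toList.length : Int) - 1 - i) ' ' = '+'
        then (st.1 + 1, (0 : Int))
      else st) ((0 : Int), (0 : Int))).1

-- ===== PORT B =====
def CountFlip_alt (inputText : String) : Int :=
  let seq := inputText.toList.filter (fun c => c == '+' || c == '-')   -- c in "+-": exact for single chars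
  if seq = [] then 0
  else (((seq.zip seq.tail).countP (fun p => p.1 != p.2) : Nat) : Int) +
       (if PySem.List.pyGetD seq (-1) ' ' = '-' then 1 else 0)   -- seq[-1]: in range since seq ≠ []

-- ===== PRECONDITION & SPEC =====
def Spec_CountFlip (inputText : String) (out : Int) : Prop := out = CountFlip_alt inputText
instance (inputText : String) (out : Int) : Decidable (Spec_CountFlip inputText out) := by unfold Spec_CountFlip; infer_instance

-- ===== CLAIM (what is proved, stated in full; the proofs are below) =====
def Claim_equal_CountFlip : Prop := ∀ (inputText : String), Dom_CountFlip inputText → Spec_CountFlip inputText (CountFlip inputText)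

-- ===== LEMMAS AND PROOFS =====

-- A's loop body as a function of the visited character
def pvStep (st : Int × Int) (c : Char) : Int × Int :=
  if st.2 = 0 ∧ c = '-' then (st.1 + 1, 1)
  else if st.2 = 1 ∧ c = '+' then (st.1 + 1, 0)
  else st

-- number of adjacent unequal pairs
def pvTrans : List Char → Int
  | [] => 0
  | [_] => 0
  | a :: b :: t => (if a ≠ b then 1 else 0) + pvTrans (b :: t)

-- A's flip count over a ±-only list, as a recursion carrying the current effective sign
def pvAux : List Char → Char → Int
  | [], _ => 0
  | c :: t, x => (if c ≠ x then 1 else 0) + pvAux t c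

lemma pvRevfold (cs : List Char) :
    ((PySem.List.pyRange 0 (cs.length : Int) 1).foldl
      (fun st i => pvStep st (PySem.List.pyGetD cs ((cs.length : Int) - 1 - i) ' '))
      ((0 : Int), (0 : Int)))
    = cs.reverse.foldl pvStep ((0 : Int), (0 : Int)) := by
  have hcong : ∀ (acc : Int × Int), ∀ i ∈ PySem.List.pyRange 0 (cs.length : Int) 1,
      pvStep acc (PySem.List.pyGetD cs ((cs.length : Int) - 1 - i) ' ')
        = pvStep acc (PySem.List.pyGetD cs.reverse i ' ') := by
    intro acc i hi
    obtain ⟨h0, h1⟩ := (PySem.List.mem_pyRange_one).1 hi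
    congr 1
    rw [PySem.List.pyGetD_eq_getElem cs ' ' (by omega) (by omega),
        PySem.List.pyGetD_eq_getElem cs.reverse ' ' h0 (by simpa using h1),
        List.getElem_reverse]
    congr 1
    omega
  rw [PySem.List.foldl_congr_mem _ _ _ _ hcong]
  have h : (cs.length : Int) = (cs.reverse.length : Int) := by simp
  rw [h]
  exact PySem.List.foldl_pyRange_zero_pyGetD' cs.reverse ' ' pvStep ((0 : Int), (0 : Int))

lemma pvFoldFilter : ∀ (l : List Char) (st : Int × Int),
    l.foldl pvStep st = (l.filter (fun c => c == '+' || c == '-')).foldl pvStep st := by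
  intro l
  induction l with
  | nil => intro st; rfl
  | cons c t ih =>
    intro st
    by_cases h : (c == '+' || c == '-') = true
    · simp only [List.filter_cons, h, if_pos, List.foldl_cons]
      exact ih _
    · have hc : c ≠ '+' ∧ c ≠ '-' := by
        constructor <;> intro hc <;> simp [hc] at h
      have hstep : pvStep st c = st := by
        simp [pvStep, hc.1, hc.2]
      simp only [List.filter_cons, h, List.foldl_cons, hstep]
      exact ih st

lemma pvAuxStep : ∀ (l : List Char), (∀ c ∈ l, c = '+' ∨ c = '-') →
    ∀ (f : Int) (x : Char), (x = '+' ∨ x = '-') →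
    (l.foldl pvStep (f, if x = '-' then 1 else 0)).1 = f + pvAux l x := by
  have hpm : ('+' : Char) ≠ '-' := by decide
  have hmp : ('-' : Char) ≠ '+' := by decide
  intro l
  induction l with
  | nil => intro _ f x _; simp [pvAux]
  | cons c t ih =>
    intro hmem f x hx
    have hmem' : ∀ a ∈ t, a = '+' ∨ a = '-' := fun a ha => hmem a (by simp [ha])
    have hc : c = '+' ∨ c = '-' := hmem c (by simp)
    rcases hx with hx | hx <;> subst hx <;> rcases hc with hc | hc <;> subst hc
    · -- x = '+', c = '+' : no flip, state stays (f, 0)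
      rw [if_neg hpm, List.foldl_cons,
          show pvStep (f, (0 : Int)) '+' = (f, 0) from by simp [pvStep, hpm]]
      have h := ih hmem' f '+' (Or.inl rfl)
      rw [if_neg hpm] at h
      rw [h]
      simp [pvAux]
    · -- x = '+', c = '-' : flip, state becomes (f+1, 1)
      rw [if_neg hpm, List.foldl_cons,
          show pvStep (f, (0 : Int)) '-' = (f + 1, 1) from by simp [pvStep]]
      have h := ih hmem' (f + 1) '-' (Or.inr rfl)
      rw [if_pos rfl] at h
      rw [h]
      have : ('-' : Char) ≠ '+' := hmp
      simp [pvAux, this]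
      omega
    · -- x = '-', c = '+' : flip, state becomes (f+1, 0)
      rw [if_pos rfl, List.foldl_cons,
          show pvStep (f, (1 : Int)) '+' = (f + 1, 0) from by simp [pvStep]]
      have h := ih hmem' (f + 1) '+' (Or.inl rfl)
      rw [if_neg hpm] at h
      rw [h]
      have : ('+' : Char) ≠ '-' := hpm
      simp [pvAux, this]
      omega
    · -- x = '-', c = '-' : no flip, state stays (f, 1)
      rw [if_pos rfl, List.foldl_cons,
          show pvStep (f, (1 : Int)) '-' = (f, 1) from by simp [pvStep]]
      have h := ih hmem' f '-' (Or.inr rfl)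
      rw [if_pos rfl] at h
      rw [h]
      simp [pvAux]

lemma pvAuxEq : ∀ (l : List Char) (x : Char),
    pvAux l x = (match l.head? with | none => 0 | some c => if c ≠ x then 1 else 0) + pvTrans l := by
  intro l
  induction l with
  | nil => intro x; simp [pvAux, pvTrans]
  | cons c t ih =>
    intro x
    cases t with
    | nil => simp [pvAux, pvTrans]
    | cons b t' =>
      have hbc : ((b ≠ c) : Prop) = (c ≠ b) := propext ne_comm
      have hih := ih c
      simp only [pvAux, List.head?_cons] at hih
      simp only [pvAux, pvTrans, List.head?_cons]
      simp only [hbc] at hih ⊢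
      omega

lemma pvTransAppend : ∀ (l : List Char) (x : Char),
    pvTrans (l ++ [x]) = pvTrans l + (match l.getLast? with | none => 0 | some a => if a ≠ x then 1 else 0) := by
  intro l
  induction l with
  | nil => intro x; simp [pvTrans]
  | cons a t ih =>
    intro x
    cases t with
    | nil => simp [pvTrans]
    | cons b t' =>
      have := ih x
      simp only [List.cons_append, pvTrans, List.getLast?_cons_cons] at this ⊢
      omega

lemma pvTransReverse : ∀ l : List Char, pvTrans l.reverse = pvTrans l := by
  intro l
  induction l with
  | nil => rfl
  | cons c t ih =>
    rw [List.reverse_cons, pvTransAppend, ih]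
    cases t with
    | nil => simp [pvTrans]
    | cons b t' =>
      have hh : (List.reverse (b :: t')).getLast? = some b := by
        simp [List.getLast?_reverse]
      rw [hh]
      have hbc : ((b ≠ c) : Prop) = (c ≠ b) := propext ne_comm
      simp only [pvTrans, hbc]
      omega

lemma pvTransZip : ∀ l : List Char,
    (((l.zip l.tail).countP (fun p => p.1 != p.2) : Nat) : Int) = pvTrans l := by
  intro l
  induction l with
  | nil => rfl
  | cons a t ih =>
    cases t with
    | nil => rfl
    | cons b t' =>
      simp only [List.tail_cons, List.zip_cons_cons, List.countP_cons, pvTrans] at ih ⊢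
      push_cast
      rw [ih]
      by_cases hab : a = b
      · simp [hab]
      · have hb : (a != b) = true := by simp [hab]
        simp [hab, hb]
        omega

-- ===== VERDICT (by name: the statement is the Claim_ definition above) =====
theorem CountFlip_spec : Claim_equal_CountFlip := by
  intro s _
  unfold Spec_CountFlip CountFlip_alt
  have hA : CountFlip s = ((s.toList.reverse).foldl pvStep ((0 : Int), (0 : Int))).1 :=
    congrArg Prod.fst (pvRevfold s.toList)
  rw [hA, pvFoldFilter, List.filter_reverse]
  set seq := s.toList.filter (fun c => c == '+' || c == '-') with hseq
  have hmem : ∀ c ∈ seq.reverse, c = '+' ∨ c = '-' := by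
    intro c hc
    rw [List.mem_reverse] at hc
    have := List.of_mem_filter hc
    rcases (by simpa using this : c = '+' ∨ c = '-') with h | h <;> simp [h]
  have h0 : (if ('+' : Char) = '-' then (1 : Int) else 0) = 0 := by decide
  have := pvAuxStep seq.reverse hmem 0 '+' (Or.inl rfl)
  rw [h0] at this
  rw [this, pvAuxEq, pvTransReverse, List.head?_reverse]
  by_cases hnil : seq = []
  · simp [hnil, pvTrans]
  · have hlast : seq.getLast? = some (seq.getLast hnil) := List.getLast?_eq_some_getLast hnil
    have hget : PySem.List.pyGetD seq (-1) ' ' = seq.getLast hnil :=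
      PySem.List.pyGetD_neg_one seq ' ' hnil
    have hlm : seq.getLast hnil ∈ seq := List.getLast_mem hnil
    have hlpm : seq.getLast hnil = '+' ∨ seq.getLast hnil = '-' := by
      have := List.of_mem_filter hlm
      simpa using this
    rw [if_neg hnil, hget, hlast, ← pvTransZip]
    rcases hlpm with h | h
    · rw [h]; simp
    · rw [h]; simp; omega
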